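-- pv_equiv track=rewrite | github.com/lizethvilla8888/tarea_2_teoria_de_la_infromacion | tarea_2_codigo.py | decodificar_codigo
-- ===== SOURCE A (Python) =====
-- def decodificar_codigo(codigo_texto, tabla_codificacion):
--     texto_decodificado = ""
--     longitud_binarios = len(list(tabla_codificacion.values())[0])
--     i = 0
--     while i < len(codigo_texto):
--         encontrado = False
--         for simbolo, binario in tabla_codificacion.items():
--             binario_codigo = codigo_texto[i:i+longitud_binarios]
--             if codigo_texto[i:i+longitud_binarios] == binario:
--                 texto_decodificado += simbolo
--                 i += longitud_binarios
--                 encontrado = True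
--                 break
--         if not encontrado:
--             return "Error: No se pudo decodificar el código."
--
--     return texto_decodificado
-- ===== SOURCE B (Python) =====
-- def decodificar_codigo(codigo_texto, tabla_codificacion):
--     if not codigo_texto:
--         return ""
--     k = len(next(iter(tabla_codificacion.values())))
--     rev = {}
--     for simbolo, binario in tabla_codificacion.items():
--         if binario not in rev:
--             rev[binario] = simbolo
--     chunks = []
--     i = 0
--     n = len(codigo_texto)
--     while i < n:
--         chunks.append(codigo_texto[i:i + k])
--         i += k
--     if any(ch not in rev for ch in chunks):
--         return "Error: No se pudo decodificar el código."
--     return "".join(rev[ch] for ch in chunks)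
-- ===== Notes on version B (the rewrite author's own statement) =====
-- stated objective: faster
-- what changed: Replaces A's interleaved decode-or-fail loop (which rescans the whole table for every position) with a two-pass design: build a reverse binary->symbol dict once (first value occurrence wins), chunk the input by fixed stride, validate all chunks against the dict, then join the mapped symbols.
import Mathlib
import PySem

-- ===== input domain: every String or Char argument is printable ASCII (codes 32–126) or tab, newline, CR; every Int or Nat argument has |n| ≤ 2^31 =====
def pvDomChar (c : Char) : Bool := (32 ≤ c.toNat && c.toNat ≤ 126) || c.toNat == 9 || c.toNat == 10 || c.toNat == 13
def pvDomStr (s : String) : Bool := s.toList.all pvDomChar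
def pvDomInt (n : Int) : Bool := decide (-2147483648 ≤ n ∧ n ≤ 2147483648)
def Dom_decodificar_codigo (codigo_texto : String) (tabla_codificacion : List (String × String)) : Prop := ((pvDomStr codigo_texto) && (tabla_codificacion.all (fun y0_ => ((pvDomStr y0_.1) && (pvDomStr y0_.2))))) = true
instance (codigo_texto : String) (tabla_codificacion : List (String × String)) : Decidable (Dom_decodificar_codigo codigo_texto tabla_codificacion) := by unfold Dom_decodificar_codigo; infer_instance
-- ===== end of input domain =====

-- B replaces A's interleaved decode-or-fail loop (table rescan per chunk) with a reverse
-- dict built once, a chunking pass, a validation pass and a join (objective: faster).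


def pvErr : String := "Error: No se pudo decodificar el código."

-- ===== PORT A =====
-- inner 'for simbolo, binario in tabla.items(): if chunk == binario: … break' = first item whose value equals the chunk
def pvAFind (chunk : List Char) : List (String × String) → Option String
  | [] => none
  | (s, b) :: rest => if chunk = b.toList then some s else pvAFind chunk rest

-- the while loop (strings handled as their code-point lists, exact); fuel (= len+1 at the call) only makes it total; Python diverges only outside Pre_
def pvALoop (cs : List Char) (items : List (String × String)) (k : Nat) : Nat → Nat → List Char → String
  | 0, _, acc => String.ofList acc
  | fuel+1, i, acc =>
    if i < cs.length then
      match pvAFind (PySem.List.slice cs (some (i : Int)) (some ((i : Int) + (k : Int)))) items with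
      | some s => pvALoop cs items k fuel (i + k) (acc ++ s.toList)
      | none => pvErr
    else String.ofList acc

def decodificar_codigo (codigo_texto : String) (tabla_codificacion : List (String × String)) : String :=
  let cs := codigo_texto.toList
  let d := PySem.Dict.ofList tabla_codificacion
  match PySem.List.pyGet? d.values 0 with     -- len(list(tabla.values())[0]); none = IndexError, excluded by Pre_
  | none => ""
  | some v0 => pvALoop cs d.items v0.toList.length (cs.length + 1) 0 []

-- ===== PORT B =====
-- rev: binary -> symbol, first occurrence of a value wins
def pvBuildRev (items : List (String × String)) : PySem.Dict (List Char) String :=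
  items.foldl (fun r p => if r.contains p.2.toList then r else r.insert p.2.toList p.1) PySem.Dict.empty

-- the chunking while loop of Source B; fuel (= len+1 at the call) only makes it total
def pvChunksLoop (cs : List Char) (k : Nat) : Nat → Nat → List (List Char) → List (List Char)
  | 0, _, acc => acc
  | fuel+1, i, acc =>
    if i < cs.length then
      pvChunksLoop cs k fuel (i + k) (acc ++ [PySem.List.slice cs (some (i : Int)) (some ((i : Int) + (k : Int)))])
    else acc

def decodificar_codigo_alt (codigo_texto : String) (tabla_codificacion : List (String × String)) : String :=
  let cs := codigo_texto.toList
  if cs.isEmpty then "" else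
  let d := PySem.Dict.ofList tabla_codificacion
  let k := (d.values.headD "").toList.length          -- len(next(iter(tabla.values()))); empty dict raises, excluded by Pre_
  let rev := pvBuildRev d.items
  let chunks := pvChunksLoop cs k (cs.length + 1) 0 []
  if chunks.any (fun ch => !(rev.contains ch)) then pvErr
  else String.ofList ((chunks.map (fun ch => (rev.getD ch "").toList)).flatten)   -- "".join over code-point lists (exact)

-- ===== PRECONDITION & SPEC =====
-- Pre_ excludes only inputs on which A does not return: the empty table (IndexError on values[0])
-- and a zero-length first code value with nonempty input (A's while loop never advances: divergence).
def Pre_decodificar_codigo (codigo_texto : String) (tabla_codificacion : List (String × String)) : Prop :=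
  (PySem.Dict.ofList tabla_codificacion).values ≠ [] ∧
  (codigo_texto.toList = [] ∨ (((PySem.Dict.ofList tabla_codificacion).values.headD "").toList.length ≠ 0))
instance (codigo_texto : String) (tabla_codificacion : List (String × String)) : Decidable (Pre_decodificar_codigo codigo_texto tabla_codificacion) := by unfold Pre_decodificar_codigo; infer_instance

def pvWitness_decodificar_codigo : String × (List (String × String)) := ("0110", [("a", "01"), ("b", "10")])

def Spec_decodificar_codigo (codigo_texto : String) (tabla_codificacion : List (String × String)) (out : String) : Prop := out = decodificar_codigo_alt codigo_texto tabla_codificacion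
instance (codigo_texto : String) (tabla_codificacion : List (String × String)) (out : String) : Decidable (Spec_decodificar_codigo codigo_texto tabla_codificacion out) := by unfold Spec_decodificar_codigo; infer_instance

-- ===== CLAIM (what is proved, stated in full; the proofs are below) =====
def Claim_equal_decodificar_codigo : Prop := ∀ (codigo_texto : String) (tabla_codificacion : List (String × String)), Dom_decodificar_codigo codigo_texto tabla_codificacion → Pre_decodificar_codigo codigo_texto tabla_codificacion → Spec_decodificar_codigo codigo_texto tabla_codificacion (decodificar_codigo codigo_texto tabla_codificacion)

-- ===== LEMMAS AND PROOFS =====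

-- A's loop rephrased structurally on the remaining input (proof-side only)
def pvRun (items : List (String × String)) (k' : Nat) : List Char → List Char → String
  | [], acc => String.ofList acc
  | c :: rest, acc =>
    match pvAFind ((c :: rest).take (k'+1)) items with
    | some s => pvRun items k' (rest.drop k') (acc ++ s.toList)
    | none => pvErr
termination_by l _ => l.length
decreasing_by simp only [List.length_drop, List.length_cons]; omega

-- B's chunk list rephrased structurally (proof-side only)
def pvChunksR (k' : Nat) : List Char → List (List Char)
  | [] => []
  | c :: rest => (c :: rest).take (k'+1) :: pvChunksR k' (rest.drop k')
termination_by l => l.length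
decreasing_by simp only [List.length_drop, List.length_cons]; omega

theorem pvRun_nil (items : List (String × String)) (k' : Nat) (acc : List Char) :
    pvRun items k' [] acc = String.ofList acc := by rw [pvRun.eq_def]

theorem pvRun_cons (items : List (String × String)) (k' : Nat) (c : Char) (rest acc : List Char) :
    pvRun items k' (c :: rest) acc =
      match pvAFind ((c :: rest).take (k'+1)) items with
      | some s => pvRun items k' (rest.drop k') (acc ++ s.toList)
      | none => pvErr := by rw [pvRun.eq_def]

theorem pvChunksR_nil (k' : Nat) : pvChunksR k' [] = [] := by rw [pvChunksR.eq_def]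

theorem pvChunksR_cons (k' : Nat) (c : Char) (rest : List Char) :
    pvChunksR k' (c :: rest) = (c :: rest).take (k'+1) :: pvChunksR k' (rest.drop k') := by
  rw [pvChunksR.eq_def]

theorem pvFind_eq_get?_aux (ch : List Char) (items : List (String × String)) :
    ∀ r : PySem.Dict (List Char) String,
      (items.foldl (fun r p => if r.contains p.2.toList then r else r.insert p.2.toList p.1) r).get? ch
        = (r.get? ch).or (pvAFind ch items) := by
  induction items with
  | nil => intro r; simp [pvAFind]
  | cons p rest ih =>
    intro r
    simp only [List.foldl_cons, pvAFind]
    rw [ih]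
    by_cases hc : r.contains p.2.toList
    · simp only [hc, if_pos]
      by_cases he : ch = p.2.toList
      · subst he
        rw [PySem.Dict.contains_eq_isSome_get?] at hc
        obtain ⟨v, hv⟩ := Option.isSome_iff_exists.mp hc
        simp [hv]
      · simp [he]
    · simp only [hc, Bool.false_eq_true, not_false_iff, if_neg]
      rw [PySem.Dict.contains_eq_isSome_get?] at hc
      have hr : r.get? p.2.toList = none := by
        cases h : r.get? p.2.toList with
        | none => rfl
        | some v => rw [h] at hc; simp at hc
      by_cases he : ch = p.2.toList
      · subst he
        rw [PySem.Dict.get?_insert_self, hr]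
        simp
      · rw [PySem.Dict.get?_insert_of_ne _ _ he]
        simp [he]

theorem pvFind_eq_get? (ch : List Char) (items : List (String × String)) :
    (pvBuildRev items).get? ch = pvAFind ch items := by
  unfold pvBuildRev
  rw [pvFind_eq_get?_aux]
  simp [PySem.Dict.get?_empty]

theorem pvALoop_eq_pvRun (cs : List Char) (items : List (String × String)) (k' : Nat) :
    ∀ (fuel i : Nat) (acc : List Char), cs.length < i + fuel →
      pvALoop cs items (k'+1) fuel i acc = pvRun items (k') (cs.drop i) acc := by
  intro fuel
  induction fuel with
  | zero =>
    intro i acc h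
    have hnil : cs.drop i = [] := List.drop_eq_nil_of_le (by omega)
    rw [hnil, pvRun_nil]
    simp [pvALoop]
  | succ fuel ih =>
    intro i acc h
    by_cases hi : i < cs.length
    · have hslice : PySem.List.slice cs (some (i : Int)) (some ((i : Int) + ((k'+1 : Nat) : Int)))
          = (cs.drop i).take (k'+1) := PySem.List.slice_natCast_add cs i (k'+1)
      obtain ⟨c, rest, hd⟩ : ∃ c rest, cs.drop i = c :: rest := by
        cases hcs : cs.drop i with
        | nil => exfalso; have := List.drop_eq_nil_iff.mp hcs; omega
        | cons c rest => exact ⟨c, rest, rfl⟩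
      simp only [pvALoop, hi, if_pos, hslice, hd]
      rw [pvRun_cons]
      have hrd : rest.drop k' = cs.drop (i + (k'+1)) := by
        have h2 : (cs.drop i).drop (k'+1) = cs.drop (i + (k'+1)) := by
          rw [List.drop_drop]; try ring_nf
        rw [hd] at h2
        simpa using h2
      cases hf : pvAFind ((c :: rest).take (k'+1)) items with
      | none => simp
      | some s =>
        simp only []
        rw [ih (i + (k'+1)) (acc ++ s.toList) (by omega), hrd]
    · have hnil : cs.drop i = [] := List.drop_eq_nil_of_le (by omega)
      rw [hnil, pvRun_nil]
      simp [pvALoop, hi]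

theorem pvChunksLoop_eq_pvChunksR (cs : List Char) (k' : Nat) :
    ∀ (fuel i : Nat) (acc : List (List Char)), cs.length < i + fuel →
      pvChunksLoop cs (k'+1) fuel i acc = acc ++ pvChunksR k' (cs.drop i) := by
  intro fuel
  induction fuel with
  | zero =>
    intro i acc h
    have hnil : cs.drop i = [] := List.drop_eq_nil_of_le (by omega)
    rw [hnil, pvChunksR_nil]
    simp [pvChunksLoop]
  | succ fuel ih =>
    intro i acc h
    by_cases hi : i < cs.length
    · have hslice : PySem.List.slice cs (some (i : Int)) (some ((i : Int) + ((k'+1 : Nat) : Int)))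
          = (cs.drop i).take (k'+1) := PySem.List.slice_natCast_add cs i (k'+1)
      obtain ⟨c, rest, hd⟩ : ∃ c rest, cs.drop i = c :: rest := by
        cases hcs : cs.drop i with
        | nil => exfalso; have := List.drop_eq_nil_iff.mp hcs; omega
        | cons c rest => exact ⟨c, rest, rfl⟩
      simp only [pvChunksLoop, hi, if_pos, hslice, hd]
      have hrd : rest.drop k' = cs.drop (i + (k'+1)) := by
        have h2 : (cs.drop i).drop (k'+1) = cs.drop (i + (k'+1)) := by
          rw [List.drop_drop]; try ring_nf
        rw [hd] at h2
        simpa using h2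
      rw [ih (i + (k'+1)) _ (by omega), pvChunksR_cons, hrd]
      simp
    · have hnil : cs.drop i = [] := List.drop_eq_nil_of_le (by omega)
      rw [hnil, pvChunksR_nil]
      simp [pvChunksLoop, hi]

theorem pvRun_eq_validate (items : List (String × String)) (k' : Nat) :
    ∀ (n : Nat) (l acc : List Char), l.length ≤ n →
      pvRun items k' l acc =
        if (pvChunksR k' l).all (fun ch => ((pvBuildRev items).get? ch).isSome)
        then String.ofList (acc ++ ((pvChunksR k' l).map (fun ch => ((pvBuildRev items).getD ch "").toList)).flatten)
        else pvErr := by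
  intro n
  induction n with
  | zero =>
    intro l acc hl
    have hnil : l = [] := by cases l with | nil => rfl | cons a b => simp at hl
    subst hnil
    simp [pvRun_nil, pvChunksR_nil]
  | succ n ih =>
    intro l acc hl
    cases l with
    | nil => simp [pvRun_nil, pvChunksR_nil]
    | cons c rest =>
      rw [pvRun_cons, pvChunksR_cons, ← pvFind_eq_get?]
      generalize (c :: rest).take (k'+1) = ch
      cases hf : (pvBuildRev items).get? ch with
      | none => simp [hf]
      | some s =>
        have hgd : (pvBuildRev items).getD ch "" = s := by
          rw [PySem.Dict.getD_eq_get?_getD, hf]; rfl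
        simp only [List.all_cons, List.map_cons, List.flatten_cons, hf, hgd, Option.isSome_some,
          Bool.true_and]
        rw [ih (rest.drop k') (acc ++ s.toList)
          (by simp only [List.length_drop]; simp only [List.length_cons] at hl; omega)]
        by_cases hall : (pvChunksR k' (rest.drop k')).all (fun ch => ((pvBuildRev items).get? ch).isSome)
        · simp [hall, List.append_assoc]
        · simp [hall]

theorem pvAny_not_contains (rev : PySem.Dict (List Char) String) (l : List (List Char)) :
    (l.any (fun ch => !(rev.contains ch))) = !(l.all (fun ch => (rev.get? ch).isSome)) := by
  induction l with
  | nil => simp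
  | cons x xs ih =>
    simp only [List.any_cons, List.all_cons, ih]
    rw [PySem.Dict.contains_eq_isSome_get?]
    cases (rev.get? x).isSome <;> cases xs.all (fun ch => (rev.get? ch).isSome) <;> simp

-- ===== VERDICT (by name: the statement is the Claim_ definition above) =====
theorem decodificar_codigo_spec : Claim_equal_decodificar_codigo := by
  intro codigo tabla _hdom hpre
  unfold Spec_decodificar_codigo decodificar_codigo decodificar_codigo_alt
  obtain ⟨hvs, hk⟩ := hpre
  obtain ⟨v0, vs, hv⟩ : ∃ v0 vs, (PySem.Dict.ofList tabla).values = v0 :: vs := by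
    cases h : (PySem.Dict.ofList tabla).values with
    | nil => exact absurd h hvs
    | cons v0 vs => exact ⟨v0, vs, rfl⟩
  have hget : PySem.List.pyGet? (v0 :: vs) (0 : Int) = some v0 := by
    simp
  simp only [hv, List.headD_cons, hget]
  by_cases hcs : codigo.toList = []
  · simp [hcs, pvALoop]
  · have hkne : v0.toList.length ≠ 0 := by
      rcases hk with h | h
      · exact absurd h hcs
      · simpa [hv] using h
    obtain ⟨k', hk'⟩ : ∃ k', v0.toList.length = k' + 1 := by
      cases h : v0.toList.length with
      | zero => exact absurd h hkne
      | succ m => exact ⟨m, rfl⟩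
    have hne : codigo.toList.isEmpty = false := by
      cases h : codigo.toList with
      | nil => exact absurd h hcs
      | cons a b => simp
    simp only [hne, Bool.false_eq_true, if_false, hk']
    rw [pvALoop_eq_pvRun codigo.toList _ k' (codigo.toList.length + 1) 0 [] (by omega)]
    rw [pvChunksLoop_eq_pvChunksR codigo.toList k' (codigo.toList.length + 1) 0 [] (by omega)]
    rw [List.drop_zero, List.nil_append]
    rw [pvRun_eq_validate _ k' codigo.toList.length codigo.toList [] (le_refl _)]
    rw [pvAny_not_contains]
    by_cases hall : (pvChunksR k' codigo.toList).all (fun ch => ((pvBuildRev (PySem.Dict.ofList tabla).items).get? ch).isSome)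
    · simp [hall]
    · simp [hall]
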